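-- pv_equiv track=rewrite | github.com/Solo2326/Python-Tecnico | gioco_impiccato.py | raddoppia_consonanti
-- ===== SOURCE A (Python) =====
-- def raddoppia_consonanti(stringa):
--     nuova_stringa = ""
--     vocali = "aàèéeiòoùu"
--
--     for i, char in enumerate(stringa):
--         if char in vocali:
--             nuova_stringa += char
--         else:
--             nuova_stringa += char * 2
--         if i == len(stringa) // 2:
--             nuova_stringa += "o"
--     return nuova_stringa
-- ===== SOURCE B (Python) =====
-- def raddoppia_consonanti(stringa):
--     if not stringa:
--         return ""
--     vocali = "aàèéeiòoùu"
--     mid = len(stringa) // 2 + 1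
--     def espandi(parte):
--         return "".join(c if c in vocali else c * 2 for c in parte)
--     return espandi(stringa[:mid]) + "o" + espandi(stringa[mid:])
-- ===== Notes on version B (the rewrite author's own statement) =====
-- stated objective: alternative
-- what changed: B replaces A's single enumerate loop (with an in-loop position test and repeated string concatenation) by splitting the string at len//2+1, expanding each half with a join over a comprehension, and concatenating the halves around the inserted midpoint letter (empty string guarded up front).
import Mathlib
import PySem

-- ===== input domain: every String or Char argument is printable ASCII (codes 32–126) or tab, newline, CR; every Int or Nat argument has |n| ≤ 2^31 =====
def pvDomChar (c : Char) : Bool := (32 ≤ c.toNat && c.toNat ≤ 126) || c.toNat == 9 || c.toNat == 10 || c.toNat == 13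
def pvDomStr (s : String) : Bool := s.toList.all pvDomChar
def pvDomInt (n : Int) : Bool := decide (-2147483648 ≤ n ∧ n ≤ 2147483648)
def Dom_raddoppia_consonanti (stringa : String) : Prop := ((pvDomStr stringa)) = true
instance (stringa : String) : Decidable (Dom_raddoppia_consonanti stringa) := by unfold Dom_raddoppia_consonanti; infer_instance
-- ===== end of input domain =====

-- B splits the string at len//2+1, expands each half by a join over a comprehension,
-- and concatenates around the inserted 'o' instead of A's single enumerate loop
-- with an in-loop position test (objective: alternative decomposition, same cost class).

-- ===== PORT A =====
-- the loop body of A: append char (doubled unless a vowel), then 'o' after index len//2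
def pvStep (vocali : List Char) (m : Int) (acc : List Char) (p : Int × Char) : List Char :=
  let acc' := if p.2 ∈ vocali then acc ++ [p.2] else acc ++ [p.2, p.2]
  if p.1 = m then acc' ++ ['o'] else acc'

def raddoppia_consonanti (stringa : String) : String :=
  let cs := stringa.toList
  let vocali := "aàèéeiòoùu".toList
  String.mk ((PySem.List.enumerate cs 0).foldl
    (pvStep vocali (PySem.Int.floordiv (cs.length : Int) 2)) [])

-- ===== PORT B =====
-- "".join(c if c in vocali else c * 2 for c in parte)
def pvEspandi (vocali : List Char) (parte : List Char) : List Char :=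
  parte.flatMap (fun c => if c ∈ vocali then [c] else [c, c])

-- stringa[:mid] / stringa[mid:] with nonnegative mid are take/drop (PySem.List.slice_to_natCast / slice_from_natCast)
def raddoppia_consonanti_alt (stringa : String) : String :=
  let cs := stringa.toList
  if cs = [] then ""
  else
    let vocali := "aàèéeiòoùu".toList
    let mid : Nat := cs.length / 2 + 1
    String.mk (pvEspandi vocali (cs.take mid) ++ 'o' :: pvEspandi vocali (cs.drop mid))

-- ===== PRECONDITION & SPEC =====
def Spec_raddoppia_consonanti (stringa : String) (out : String) : Prop := out = raddoppia_consonanti_alt stringa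
instance (stringa : String) (out : String) : Decidable (Spec_raddoppia_consonanti stringa out) := by unfold Spec_raddoppia_consonanti; infer_instance

-- ===== CLAIM (what is proved, stated in full; the proofs are below) =====
def Claim_equal_raddoppia_consonanti : Prop := ∀ (stringa : String), Dom_raddoppia_consonanti stringa → Spec_raddoppia_consonanti stringa (raddoppia_consonanti stringa)

-- ===== LEMMAS AND PROOFS =====

lemma pvEspandi_cons (vocali : List Char) (c : Char) (t : List Char) :
    pvEspandi vocali (c :: t) =
      (if c ∈ vocali then [c] else [c, c]) ++ pvEspandi vocali t := by
  simp [pvEspandi]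

-- characterisation of A's fold: the 'o' lands right after position m - k (when in range)
lemma foldA_char (vocali : List Char) (m : Int) :
    ∀ (cs : List Char) (k : Int) (acc : List Char),
      (PySem.List.enumerate cs k).foldl (pvStep vocali m) acc =
        acc ++ (if k ≤ m ∧ m < k + cs.length
                then pvEspandi vocali (cs.take (m - k + 1).toNat) ++
                      'o' :: pvEspandi vocali (cs.drop (m - k + 1).toNat)
                else pvEspandi vocali cs) := by
  intro cs
  induction cs with
  | nil =>
      intro k acc
      simp [PySem.List.enumerate_nil, pvEspandi]
  | cons c t ih =>
      intro k acc
      rw [PySem.List.enumerate_cons, List.foldl_cons, ih]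
      by_cases hk : k = m
      · subst hk
        have h1 : ¬ (k + 1 ≤ k ∧ k < k + 1 + (t.length : Int)) := by omega
        have h2 : (k ≤ k ∧ k < k + ((c :: t).length : Int)) := by
          refine ⟨le_refl k, ?_⟩
          simp only [List.length_cons]
          push_cast
          omega
        have h3 : (k - k + 1).toNat = 1 := by omega
        simp only [pvStep, if_neg h1, if_pos h2, h3,
          List.take_succ_cons, List.take_zero, List.drop_succ_cons, List.drop_zero]
        by_cases hv : c ∈ vocali <;>
          simp [hv, pvEspandi]
      · have hchain : (k ≤ m ∧ m < k + ((c :: t).length : Int)) ↔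
            (k + 1 ≤ m ∧ m < k + 1 + (t.length : Int)) := by
          simp; omega
        simp only [pvStep, if_neg hk]
        by_cases hr : k + 1 ≤ m ∧ m < k + 1 + (t.length : Int)
        · have hr' : k ≤ m ∧ m < k + ((c :: t).length : Int) := hchain.mpr hr
          have htn : (m - k + 1).toNat = (m - (k + 1) + 1).toNat + 1 := by omega
          simp only [if_pos hr, if_pos hr', htn,
            List.take_succ_cons, List.drop_succ_cons, pvEspandi_cons]
          by_cases hv : c ∈ vocali <;> simp [hv]
        · have hr' : ¬ (k ≤ m ∧ m < k + ((c :: t).length : Int)) :=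
            fun h => hr (hchain.mp h)
          simp only [if_neg hr, if_neg hr', pvEspandi_cons]
          by_cases hv : c ∈ vocali <;> simp [hv]

-- ===== VERDICT (by name: the statement is the Claim_ definition above) =====
theorem raddoppia_consonanti_spec : Claim_equal_raddoppia_consonanti := by
  intro stringa _
  unfold Spec_raddoppia_consonanti
  show String.mk ((PySem.List.enumerate stringa.toList).foldl
      (pvStep "aàèéeiòoùu".toList (PySem.Int.floordiv (stringa.toList.length : Int) 2)) []) =
    (if stringa.toList = [] then ""
     else String.mk (pvEspandi "aàèéeiòoùu".toList (stringa.toList.take (stringa.toList.length / 2 + 1)) ++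
       'o' :: pvEspandi "aàèéeiòoùu".toList (stringa.toList.drop (stringa.toList.length / 2 + 1))))
  set cs := stringa.toList with hcs
  by_cases h : cs = []
  · simp [h, PySem.List.enumerate_nil]
    decide
  · have hlen : 0 < cs.length := List.length_pos_iff.mpr h
    have hm : PySem.Int.floordiv (cs.length : Int) 2 = ((cs.length / 2 : Nat) : Int) := by
      exact_mod_cast PySem.Int.floordiv_natCast cs.length 2
    have hrange : (0 : Int) ≤ ((cs.length / 2 : Nat) : Int) ∧
        ((cs.length / 2 : Nat) : Int) < 0 + (cs.length : Int) := by
      constructor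
      · positivity
      · have : cs.length / 2 < cs.length := Nat.div_lt_self hlen (by omega)
        push_cast; omega
    have htn : (((cs.length / 2 : Nat) : Int) - 0 + 1).toNat = cs.length / 2 + 1 := by omega
    rw [foldA_char, hm, if_pos hrange, htn, if_neg h]
    simp
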